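-- pv_equiv track=rewrite | github.com/qtproject/qt-apps-qtauto-deployment-server | store/tags.py | validateTag
-- ===== SOURCE A (Python) =====
-- def validateTagVersion(version):
--     for i in version:
--         if not i.isalnum():
--             if not ((i == "_") or (i == ".")):
--                 return False
--     return True
--
-- def validateTag(tag):
--     if len(tag) == 0:
--         return False
--     lst = tag.split(':')
--     if len(lst) > 2:
--         return False  # More than one version component is not allowed
--     for i in lst[0]:
--         if not i.isalnum():
--             if i != "_":
--                 return False
--     if len(lst) > 1:
--         return validateTagVersion(lst[1])
--     return True
-- ===== SOURCE B (Python) =====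
-- def validateTag(tag):
--     # Single left-to-right scan with a seen-colon flag instead of split plus per-segment loops.
--     if len(tag) == 0:
--         return False
--     seen_colon = False
--     for c in tag:
--         if c == ':':
--             if seen_colon:
--                 return False
--             seen_colon = True
--         elif not (c.isalnum() or c == '_' or (seen_colon and c == '.')):
--             return False
--     return True
-- ===== Notes on version B (the rewrite author's own statement) =====
-- stated objective: simpler
-- what changed: Replaces splitting on the colon plus two separate per-segment loops with a single left-to-right character scan carrying a seen-colon flag that switches the allowed character set.
import Mathlib
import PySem

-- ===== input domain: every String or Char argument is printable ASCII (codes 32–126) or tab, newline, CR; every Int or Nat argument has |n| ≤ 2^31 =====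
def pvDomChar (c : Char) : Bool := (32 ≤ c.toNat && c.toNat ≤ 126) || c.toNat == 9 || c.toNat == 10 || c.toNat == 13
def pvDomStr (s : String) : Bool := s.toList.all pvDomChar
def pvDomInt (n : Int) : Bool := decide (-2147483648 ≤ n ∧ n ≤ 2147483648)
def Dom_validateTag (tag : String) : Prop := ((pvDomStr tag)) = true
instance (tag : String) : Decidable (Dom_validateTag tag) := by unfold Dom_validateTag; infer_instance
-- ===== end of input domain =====

-- B replaces A's split-on-colon plus two per-segment loops by one character scan with a seen-colon flag (simpler; same cost).

-- ===== PORT A =====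
-- for i in version: if not i.isalnum(): if not (i == "_" or i == "."): return False / return True
def validateTagVersionA : List Char → Bool
  | [] => true
  | c :: rest =>
    if ¬ (PySem.Chars.isalnum c = true) then
      if ¬ (c = '_' ∨ c = '.') then false else validateTagVersionA rest
    else validateTagVersionA rest

-- for i in lst[0]: if not i.isalnum(): if i != "_": return False  (true = loop fell through)
def validateTagNameA : List Char → Bool
  | [] => true
  | c :: rest =>
    if ¬ (PySem.Chars.isalnum c = true) then
      if c ≠ '_' then false else validateTagNameA rest
    else validateTagNameA rest

def validateTag (tag : String) : Bool :=
  if PySem.Str.len tag = 0 then false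
  else
    let lst := PySem.Chars.splitOn tag.toList [':']
    if lst.length > 2 then false
    else if validateTagNameA (lst.headD []) = false then false
    else if lst.length > 1 then validateTagVersionA (lst.getD 1 [])
    else true

-- ===== PORT B =====
-- one pass; `seen` = a colon has already been scanned
def validateTagScanB (seen : Bool) : List Char → Bool
  | [] => true
  | c :: rest =>
    if c = ':' then
      if seen then false else validateTagScanB true rest
    else if PySem.Chars.isalnum c || c = '_' || (seen && c = '.') then
      validateTagScanB seen rest
    else false

def validateTag_alt (tag : String) : Bool :=
  if PySem.Str.len tag = 0 then false
  else validateTagScanB false tag.toList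

-- ===== PRECONDITION & SPEC =====
def Spec_validateTag (tag : String) (out : Bool) : Prop := out = validateTag_alt tag
instance (tag : String) (out : Bool) : Decidable (Spec_validateTag tag out) := by unfold Spec_validateTag; infer_instance

-- ===== CLAIM (what is proved, stated in full; the proofs are below) =====
def Claim_equal_validateTag : Prop := ∀ (tag : String), Dom_validateTag tag → Spec_validateTag tag (validateTag tag)

-- ===== LEMMAS AND PROOFS =====

-- (head, tail-of-pieces) of splitting at the colon, as a structural recursion
def pvSp : List Char → List Char × List (List Char)
  | [] => ([], [])
  | c :: rest =>
    if c = ':' then ([], (pvSp rest).1 :: (pvSp rest).2)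
    else (c :: (pvSp rest).1, (pvSp rest).2)

theorem pvGo_step (n : Nat) (c : Char) (rest cur : List Char) (acc : List (List Char)) :
    PySem.Chars.splitOn.go [':'] (n+1) (c :: rest) cur acc
      = if c = ':' then PySem.Chars.splitOn.go [':'] n rest [] (cur.reverse :: acc)
        else PySem.Chars.splitOn.go [':'] n rest (c :: cur) acc := by
  by_cases hc : c = ':'
  · subst hc; simp [PySem.Chars.splitOn.go, List.isPrefixOf]
  · have hc' : ¬ (':' = c) := fun e => hc e.symm
    simp [PySem.Chars.splitOn.go, List.isPrefixOf, hc, hc']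

theorem pvSp_go (fuel : Nat) (l cur : List Char) (acc : List (List Char))
    (h : l.length < fuel) :
    PySem.Chars.splitOn.go [':'] fuel l cur acc
      = acc.reverse ++ (cur.reverse ++ (pvSp l).1) :: (pvSp l).2 := by
  induction fuel generalizing l cur acc with
  | zero => omega
  | succ n ih =>
    cases l with
    | nil => simp [PySem.Chars.splitOn.go, pvSp]
    | cons c rest =>
      have hlen : rest.length < n := by simp at h; omega
      rw [pvGo_step]
      by_cases hc : c = ':'
      · subst hc
        rw [if_pos rfl, ih rest [] (cur.reverse :: acc) hlen]
        simp [pvSp]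
      · rw [if_neg hc, ih rest (c :: cur) acc hlen]
        simp [pvSp, hc]

theorem pvSplitOn_eq (cs : List Char) :
    PySem.Chars.splitOn cs [':'] = (pvSp cs).1 :: (pvSp cs).2 := by
  have := pvSp_go (cs.length + 1) cs [] [] (Nat.lt_succ_self _)
  simpa [PySem.Chars.splitOn] using this

-- the scan after a colon: no further colon and the rest is a valid version
theorem pvScan_true (cs : List Char) :
    validateTagScanB true cs
      = ((pvSp cs).2.isEmpty && validateTagVersionA (pvSp cs).1) := by
  induction cs with
  | nil => simp [validateTagScanB, validateTagVersionA, pvSp]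
  | cons c rest ih =>
    by_cases hc : c = ':'
    · subst hc; simp [validateTagScanB, pvSp]
    · by_cases hok : (PySem.Chars.isalnum c || c = '_' || c = '.') = true
      · have : validateTagVersionA (c :: (pvSp rest).1)
            = validateTagVersionA (pvSp rest).1 := by
          simp only [Bool.or_eq_true, decide_eq_true_eq] at hok
          rcases hok with (h | h) | h <;>
            simp [validateTagVersionA, h]
        simp only [validateTagScanB, pvSp, if_neg hc]
        rw [if_pos (by simpa using hok), ih]
        simp [this]
      · simp only [Bool.or_eq_true, decide_eq_true_eq, not_or] at hok
        obtain ⟨⟨h1, h2⟩, h3⟩ := hok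
        simp [validateTagScanB, pvSp, validateTagVersionA, hc, h1, h2, h3]

-- A's post-guard body (with the split written via pvSp) = B's scan, for every character list
theorem pvMain (cs : List Char) :
    (if ((pvSp cs).1 :: (pvSp cs).2).length > 2 then false
     else if validateTagNameA (((pvSp cs).1 :: (pvSp cs).2).headD []) = false then false
     else if ((pvSp cs).1 :: (pvSp cs).2).length > 1 then
       validateTagVersionA (((pvSp cs).1 :: (pvSp cs).2).getD 1 [])
     else true)
      = validateTagScanB false cs := by
  simp only [List.length_cons, List.headD_cons, List.getD_eq_getElem?_getD]
  induction cs with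
  | nil => simp [pvSp, validateTagNameA, validateTagScanB]
  | cons c rest ih =>
    by_cases hc : c = ':'
    · subst hc
      simp only [pvSp, validateTagScanB, if_true]
      rw [pvScan_true]
      cases h2 : (pvSp rest).2 with
      | nil => simp [validateTagNameA]
      | cons p ps => simp
    · by_cases hok : (PySem.Chars.isalnum c || c = '_') = true
      · have hname : validateTagNameA (c :: (pvSp rest).1)
            = validateTagNameA (pvSp rest).1 := by
          simp only [Bool.or_eq_true, decide_eq_true_eq] at hok
          rcases hok with h | h <;> simp [validateTagNameA, h]
        have hscan : validateTagScanB false (c :: rest) = validateTagScanB false rest := by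
          simp only [Bool.or_eq_true, decide_eq_true_eq] at hok
          rcases hok with h | h <;> simp [validateTagScanB, hc, h]
        simp only [pvSp, if_neg hc, hname, hscan]
        exact ih
      · simp only [Bool.or_eq_true, decide_eq_true_eq, not_or] at hok
        obtain ⟨h1, h2⟩ := hok
        have hname : validateTagNameA (c :: (pvSp rest).1) = false := by
          simp [validateTagNameA, h1, h2]
        have hscan : validateTagScanB false (c :: rest) = false := by
          simp [validateTagScanB, hc, h1, h2]
        simp [pvSp, hc, hname, hscan]

-- ===== VERDICT (by name: the statement is the Claim_ definition above) =====
theorem validateTag_spec : Claim_equal_validateTag := by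
  intro tag _
  unfold Spec_validateTag validateTag validateTag_alt
  by_cases hz : PySem.Str.len tag = 0
  · rw [if_pos hz, if_pos hz]
  · simp only []
    rw [if_neg hz, if_neg hz, pvSplitOn_eq]
    exact pvMain tag.toList
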